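-- pv_equiv track=rewrite | github.com/hydpy-dev/hydpy | hydpy/cythons/modelutils.py | remove_linebreaks_within_equations
-- ===== SOURCE A (Python) =====
-- def remove_linebreaks_within_equations(code: str) -> str:
--     r"""Remove line breaks within equations.
--
--     The following example is not an exhaustive test but shows how the method works
--     in principle:
--
--     >>> code = "asdf = \\\n(a\n+b)"
--     >>> from hydpy.cythons.modelutils import FuncConverter
--     >>> FuncConverter.remove_linebreaks_within_equations(code)
--     'asdf = (a+b)'
--     """
--     code = code.replace("\\\n", "")
--     chars = []
--     counter = 0
--     for char in code:
--         if char in ("(", "[", "{"):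
--             counter += 1
--         elif char in (")", "]", "}"):
--             counter -= 1
--         if not (counter and (char == "\n")):
--             chars.append(char)
--     return "".join(chars)
-- ===== SOURCE B (Python) =====
-- def _delta(line):
--     d = 0
--     for ch in line:
--         if ch in "([{":
--             d += 1
--         elif ch in ")]}":
--             d -= 1
--     return d
--
--
-- def remove_linebreaks_within_equations(code: str) -> str:
--     code = code.replace("\\\n", "")
--     lines = code.split("\n")
--     pieces = [lines[0]]
--     depth = _delta(lines[0])
--     for line in lines[1:]:
--         if depth == 0:
--             pieces.append("\n")
--         pieces.append(line)
--         depth += _delta(line)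
--     return "".join(pieces)
-- ===== Notes on version B (the rewrite author's own statement) =====
-- stated objective: faster
-- what changed: Instead of A's per-character Python loop that filters every character, B splits the code into lines once with str.split and decides per line whether to re-emit the separating newline, tracking bracket depth via a per-line delta; the bulk copying is done by C-level split/join.
import Mathlib
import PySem

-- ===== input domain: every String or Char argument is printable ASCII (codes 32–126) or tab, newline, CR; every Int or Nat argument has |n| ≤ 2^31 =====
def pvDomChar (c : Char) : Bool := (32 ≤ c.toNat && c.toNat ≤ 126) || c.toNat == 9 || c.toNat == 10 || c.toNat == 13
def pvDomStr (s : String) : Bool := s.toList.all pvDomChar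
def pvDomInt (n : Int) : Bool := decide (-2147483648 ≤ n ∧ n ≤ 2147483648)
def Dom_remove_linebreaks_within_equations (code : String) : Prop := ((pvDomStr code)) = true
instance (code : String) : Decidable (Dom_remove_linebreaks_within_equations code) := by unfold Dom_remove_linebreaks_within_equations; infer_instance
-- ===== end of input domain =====

-- B removes bracket-enclosed newlines by splitting into lines once and re-emitting
-- each separating '\n' only at bracket depth zero, instead of A's per-character filter.

-- ===== PORT A =====
-- one step of A's character loop: update the counter, then keep the character
-- unless it is a '\n' while the counter is nonzero
def pvAStep (st : Int × List Char) (ch : Char) : Int × List Char :=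
  let c : Int :=
    if ch = '(' ∨ ch = '[' ∨ ch = '{' then st.1 + 1
    else if ch = ')' ∨ ch = ']' ∨ ch = '}' then st.1 - 1
    else st.1
  if ¬(c ≠ 0 ∧ ch = '\n') then (c, st.2 ++ [ch]) else (c, st.2)

def remove_linebreaks_within_equations (code : String) : String :=
  let cs := (PySem.Str.replace code "\\\n" "").toList
  String.ofList (cs.foldl pvAStep (0, [])).2

-- ===== PORT B =====
-- body of _delta's loop
def pvDeltaStep (d : Int) (ch : Char) : Int :=
  if ch = '(' ∨ ch = '[' ∨ ch = '{' then d + 1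
  else if ch = ')' ∨ ch = ']' ∨ ch = '}' then d - 1
  else d

-- B's helper _delta: net bracket-depth change of one line
def pvDelta (line : List Char) : Int := line.foldl pvDeltaStep 0

-- one step of B's loop over the remaining lines
def pvBStep (st : Int × List Char) (line : List Char) : Int × List Char :=
  (st.1 + pvDelta line, st.2 ++ (if st.1 = 0 then '\n' :: line else line))

def remove_linebreaks_within_equations_alt (code : String) : String :=
  let cs := (PySem.Str.replace code "\\\n" "").toList
  match cs.splitOn '\n' with
  | [] => ""          -- unreachable: splitOn never returns []
  | first :: rest => String.ofList (rest.foldl pvBStep (pvDelta first, first)).2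

-- ===== PRECONDITION & SPEC =====
def Spec_remove_linebreaks_within_equations (code : String) (out : String) : Prop := out = remove_linebreaks_within_equations_alt code
instance (code : String) (out : String) : Decidable (Spec_remove_linebreaks_within_equations code out) := by unfold Spec_remove_linebreaks_within_equations; infer_instance

-- ===== CLAIM (what is proved, stated in full; the proofs are below) =====
def Claim_equal_remove_linebreaks_within_equations : Prop := ∀ (code : String), Dom_remove_linebreaks_within_equations code → Spec_remove_linebreaks_within_equations code (remove_linebreaks_within_equations code)

-- ===== LEMMAS AND PROOFS =====

-- the delta fold from an arbitrary start value
lemma pvDelta_foldl (l : List Char) :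
    ∀ c : Int, l.foldl pvDeltaStep c = c + pvDelta l := by
  induction l with
  | nil => intro c; simp [pvDelta]
  | cons b t ih =>
    intro c
    have h1 : pvDelta (b :: t) = t.foldl pvDeltaStep (pvDeltaStep 0 b) := rfl
    rw [List.foldl_cons, ih, h1, ih]
    simp only [pvDeltaStep]
    split_ifs <;> ring

lemma pvDelta_cons (a : Char) (t : List Char) :
    pvDelta (a :: t) = pvDeltaStep 0 a + pvDelta t := by
  have h1 : pvDelta (a :: t) = t.foldl pvDeltaStep (pvDeltaStep 0 a) := rfl
  rw [h1, pvDelta_foldl]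

-- A's loop over a newline-free block: counter advances by pvDelta, all chars kept
lemma aFold_free (l : List Char) (h : '\n' ∉ l) :
    ∀ (c : Int) (acc : List Char),
      l.foldl pvAStep (c, acc) = (c + pvDelta l, acc ++ l) := by
  induction l with
  | nil => intro c acc; simp [pvDelta]
  | cons a t ih =>
    intro c acc
    have ha : a ≠ '\n' := by intro hh; exact h (hh ▸ List.mem_cons_self)
    have ht : '\n' ∉ t := fun hh => h (List.mem_cons_of_mem _ hh)
    have hstep : pvAStep (c, acc) a = (c + pvDeltaStep 0 a, acc ++ [a]) := by
      simp only [pvAStep, pvDeltaStep]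
      split_ifs <;> simp_all <;> ring
    rw [List.foldl_cons, hstep, ih ht, pvDelta_cons]
    simp [add_assoc]

-- A's step on a newline keeps it iff the counter is zero
lemma aStep_newline (c : Int) (acc : List Char) :
    pvAStep (c, acc) '\n' = (c, if c = 0 then acc ++ ['\n'] else acc) := by
  simp only [pvAStep]
  split_ifs <;> simp_all

lemma intercalate_cons₂ (x : Char) (a b : List Char) (t : List (List Char)) :
    [x].intercalate (a :: b :: t) = a ++ x :: [x].intercalate (b :: t) := by
  simp [List.intercalate, List.intersperse_cons₂]

-- main invariant: A's character fold over the interleaved lines equals B's line fold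
lemma main_fold (ls : List (List Char)) :
    ∀ (first : List Char) (c : Int) (acc : List Char),
      '\n' ∉ first → (∀ l ∈ ls, '\n' ∉ l) →
      (([ '\n' ].intercalate (first :: ls)).foldl pvAStep (c, acc))
        = ls.foldl pvBStep (c + pvDelta first, acc ++ first) := by
  induction ls with
  | nil =>
    intro first c acc hf _
    simpa [List.intercalate] using aFold_free first hf c acc
  | cons l2 t ih =>
    intro first c acc hf hall
    have h2 : '\n' ∉ l2 := hall l2 List.mem_cons_self
    have ht : ∀ l ∈ t, '\n' ∉ l := fun l hl => hall l (List.mem_cons_of_mem _ hl)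
    rw [intercalate_cons₂, List.foldl_append, aFold_free first hf c acc,
        List.foldl_cons, aStep_newline, ih l2 _ _ h2 ht]
    rw [List.foldl_cons]
    congr 1
    simp only [pvBStep]
    split_ifs <;> simp

-- every chunk of splitOn x is x-free
lemma splitOn_chunks_free (x : Char) (cs : List Char) :
    ∀ l ∈ cs.splitOn x, x ∉ l := by
  induction cs with
  | nil => intro l hl; simp [List.splitOn, List.splitOnP_nil] at hl; simp [hl]
  | cons a t ih =>
    intro l hl
    have hcons : (a :: t).splitOn x
        = if a == x then [] :: t.splitOn x
          else (t.splitOn x).modifyHead (List.cons a) := by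
      simp [List.splitOn, List.splitOnP_cons]
    rw [hcons] at hl
    by_cases hax : a == x
    · rw [if_pos hax] at hl
      rcases List.mem_cons.1 hl with hl | hl
      · simp [hl]
      · exact ih l hl
    · rw [if_neg hax] at hl
      obtain ⟨hd, tl, heq⟩ := List.exists_cons_of_ne_nil
        (List.splitOnP_ne_nil (· == x) t)
      have heq' : t.splitOn x = hd :: tl := heq
      rw [heq', List.modifyHead_cons] at hl
      rcases List.mem_cons.1 hl with hl | hl
      · subst hl
        intro hmem
        rcases List.mem_cons.1 hmem with hm | hm
        · exact hax (by simp [hm])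
        · exact ih hd (heq' ▸ List.mem_cons_self) hm
      · exact ih l (heq' ▸ List.mem_cons_of_mem _ hl)

-- ===== VERDICT (by name: the statement is the Claim_ definition above) =====
theorem remove_linebreaks_within_equations_spec : Claim_equal_remove_linebreaks_within_equations := by
  intro code _
  show remove_linebreaks_within_equations code = remove_linebreaks_within_equations_alt code
  show String.ofList
      (((PySem.Str.replace code "\\\n" "").toList).foldl pvAStep (0, [])).2
    = match ((PySem.Str.replace code "\\\n" "").toList).splitOn '\n' with
      | [] => ""
      | first :: rest => String.ofList (rest.foldl pvBStep (pvDelta first, first)).2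
  generalize (PySem.Str.replace code "\\\n" "").toList = cs
  obtain ⟨first, rest, hsplit⟩ := List.exists_cons_of_ne_nil
    (List.splitOnP_ne_nil (· == '\n') cs)
  have hsplit' : cs.splitOn '\n' = first :: rest := hsplit
  have hfree := splitOn_chunks_free '\n' cs
  rw [hsplit'] at hfree
  have hrec : ['\n'].intercalate (first :: rest) = cs := by
    rw [← hsplit']; exact List.intercalate_splitOn (xs := cs) '\n'
  rw [hsplit', ← hrec,
      main_fold rest first 0 [] (hfree first List.mem_cons_self)
        (fun l hl => hfree l (List.mem_cons_of_mem _ hl))]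
  simp
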